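-- pv_equiv track=rewrite | github.com/wangjian2254/WeiKeZBJ | tools/util.py | getReplyCode
-- ===== SOURCE A (Python) =====
-- def getReplyCode(code):
--     codeStr = ''
--     codelist = code.split('-')
--     codeLength = len(codelist)
--     for i in range(codeLength):
--       if (codelist[i].find('s')==0):
--         codeStr = code
--         return codeStr
--       else:
--         if(i==(codeLength-1)):
--           codeStr = codeStr +('s'+codelist[i])
--         else:
--           if(i==(codeLength-1)):
--             codeStr = codeStr + codelist[i]
--           else:
--             codeStr = codeStr + codelist[i]+"-"
--     return codeStr
-- ===== SOURCE B (Python) =====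
-- def getReplyCode(code):
--     if code.startswith('s') or '-s' in code:
--         return code
--     i = code.rfind('-')
--     return code[:i + 1] + 's' + code[i + 1:]
-- ===== Notes on version B (the rewrite author's own statement) =====
-- stated objective: simpler
-- what changed: B never splits the string into a segment list: it decides the early-return case by substring search (startswith('s') or '-s' in code) and otherwise inserts 's' directly after the last dash found with rfind, via two slices, instead of A's split/indexed-loop/rebuild-with-separators
import Mathlib
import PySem

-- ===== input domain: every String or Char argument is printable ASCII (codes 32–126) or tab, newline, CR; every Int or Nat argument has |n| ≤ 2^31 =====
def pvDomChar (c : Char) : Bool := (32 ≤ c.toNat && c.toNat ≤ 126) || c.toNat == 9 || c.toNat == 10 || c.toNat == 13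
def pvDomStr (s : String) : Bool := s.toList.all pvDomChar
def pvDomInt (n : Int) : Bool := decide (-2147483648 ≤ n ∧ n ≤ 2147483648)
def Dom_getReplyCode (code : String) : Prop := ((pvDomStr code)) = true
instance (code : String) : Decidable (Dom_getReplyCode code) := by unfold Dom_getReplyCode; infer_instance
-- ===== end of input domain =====

-- B avoids A's split/loop/rebuild entirely: it decides the early return by substring search and inserts 's' after the last dash (rfind + two slices); return value proved equal.

-- ===== PORT A =====
-- code.split('-') with the nonempty separator '-' (exact via PySem.Chars.splitOn)
def pySplitDash (code : String) : List String :=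
  (PySem.Chars.splitOn code.toList "-".toList).map String.ofList

-- the 'for i in range(codeLength)' loop of A, with its early return and its (dead) duplicated i==codeLength-1 branch kept
def getReplyCodeGo (code : String) (codeLength : Nat) : List String → Nat → String → String
  | [], _, codeStr => codeStr
  | seg :: rest, i, codeStr =>
    if PySem.Str.find seg "s" = 0 then code
    else if i = codeLength - 1 then getReplyCodeGo code codeLength rest (i + 1) (codeStr ++ ("s" ++ seg))
    else if i = codeLength - 1 then getReplyCodeGo code codeLength rest (i + 1) (codeStr ++ seg)
    else getReplyCodeGo code codeLength rest (i + 1) (codeStr ++ seg ++ "-")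

def getReplyCode (code : String) : String :=
  let codelist := pySplitDash code
  getReplyCodeGo code codelist.length codelist 0 ""

-- ===== PORT B =====
def getReplyCode_alt (code : String) : String :=
  if PySem.Str.startswith code "s" || PySem.Str.isIn "-s" code then code
  else
    let i := PySem.Str.rfind code "-"
    PySem.Str.slice code none (some (i + 1)) ++ "s" ++ PySem.Str.slice code (some (i + 1)) none

-- ===== PRECONDITION & SPEC =====
def Spec_getReplyCode (code : String) (out : String) : Prop := out = getReplyCode_alt code
instance (code : String) (out : String) : Decidable (Spec_getReplyCode code out) := by unfold Spec_getReplyCode; infer_instance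

-- ===== CLAIM (what is proved, stated in full; the proofs are below) =====
def Claim_equal_getReplyCode : Prop := ∀ (code : String), Dom_getReplyCode code → Spec_getReplyCode code (getReplyCode code)

-- ===== LEMMAS AND PROOFS =====

-- codelist[i].find('s') == 0 says exactly what "segment starts with 's'" says
lemma find_s_zero_iff (seg : String) :
    (PySem.Str.find seg "s" = 0) ↔ PySem.Str.startswith seg "s" = true := by
  rw [PySem.Str.find_eq, PySem.Str.startswith_eq, PySem.Chars.startswith_iff]
  constructor
  · intro h
    have h0 : (0 : Int) ≤ PySem.Chars.find seg.toList "s".toList := by rw [h]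
    have := (PySem.Chars.find_spec h0).1
    rw [h] at this
    simpa using this
  · intro h
    have hn : (0 : Int) ≤ PySem.Chars.find seg.toList "s".toList :=
      (PySem.Chars.find_nonneg_iff _ _).2 h.isInfix
    rcases PySem.Chars.find_spec hn with ⟨_, hmin⟩
    by_contra hne
    have hpos : 0 < (PySem.Chars.find seg.toList "s".toList).toNat := by omega
    exact hmin 0 hpos (by simpa using h)

lemma str_join_singleton (sep x : String) : PySem.Str.join sep [x] = x := by
  rw [← String.toList_inj]
  simp [PySem.Str.toList_join, PySem.Chars.join_singleton]

lemma str_join_cons (sep a : String) (xs : List String) (h : xs ≠ []) :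
    PySem.Str.join sep (a :: xs) = a ++ sep ++ PySem.Str.join sep xs := by
  cases xs with
  | nil => exact absurd rfl h
  | cons b bs =>
    rw [← String.toList_inj]
    simp [PySem.Str.toList_join, PySem.Chars.join_cons_cons]

-- A's loop, on any nonempty suffix of the segment list, computes the scan-then-rebuild value
lemma goA_eq (code : String) (n : Nat) :
    ∀ (l : List String) (i : Nat) (acc : String), l ≠ [] → i + l.length = n →
      getReplyCodeGo code n l i acc =
        if l.any (fun seg => PySem.Str.startswith seg "s") then code
        else acc ++ PySem.Str.join "-" (l.dropLast ++ ["s" ++ l.getLastD ""]) := by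
  intro l
  induction l with
  | nil => intro _ _ h _; exact absurd rfl h
  | cons seg rest ih =>
    intro i acc _ hlen
    have step : getReplyCodeGo code n (seg :: rest) i acc =
        if PySem.Str.find seg "s" = 0 then code
        else if i = n - 1 then getReplyCodeGo code n rest (i + 1) (acc ++ ("s" ++ seg))
        else if i = n - 1 then getReplyCodeGo code n rest (i + 1) (acc ++ seg)
        else getReplyCodeGo code n rest (i + 1) (acc ++ seg ++ "-") := rfl
    by_cases hs : PySem.Str.startswith seg "s" = true
    · have hf : PySem.Str.find seg "s" = 0 := (find_s_zero_iff seg).mpr hs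
      rw [step, if_pos hf]
      simp only [List.any_cons, hs, Bool.true_or, if_true]
    · have hf : ¬ PySem.Str.find seg "s" = 0 := fun h => hs ((find_s_zero_iff seg).mp h)
      have hsb : PySem.Str.startswith seg "s" = false := by simpa using hs
      cases rest with
      | nil =>
        have hi : i = n - 1 := by simp at hlen; omega
        rw [step, if_neg hf, if_pos hi]
        simp only [getReplyCodeGo, List.any_cons, List.any_nil, Bool.or_false, hsb,
          Bool.false_eq_true, if_false]
        simp [str_join_singleton, List.getLastD_eq_getLast?]
      | cons seg2 rest2 =>
        have hi : ¬ i = n - 1 := by simp at hlen; omega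
        have hrec := ih (i + 1) (acc ++ seg ++ "-") (by simp) (by simp at hlen ⊢; omega)
        rw [step, if_neg hf, if_neg hi, if_neg hi, hrec]
        by_cases ha : ((seg2 :: rest2).any fun seg => PySem.Str.startswith seg "s") = true
        · simp only [ha, if_true, List.any_cons, Bool.or_true]
        · have hab : ((seg2 :: rest2).any fun seg => PySem.Str.startswith seg "s") = false := by
            simpa using ha
          have hdrop : (seg :: seg2 :: rest2).dropLast = seg :: (seg2 :: rest2).dropLast := rfl
          have hlast : (seg :: seg2 :: rest2).getLastD "" = (seg2 :: rest2).getLastD "" := by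
            simp [List.getLastD_eq_getLast?, List.getLast?_cons_cons]
          simp only [List.any_cons, hsb, hab, Bool.or_self, Bool.false_eq_true, if_false,
            hdrop, hlast, List.cons_append]
          rw [str_join_cons "-" seg _ (by simp)]
          simp [String.append_assoc]

-- ---- a head/tail recursion computing split on the single-char separator '-' ----
def pvSplit : List Char → List Char × List (List Char)
  | [] => ([], [])
  | c :: r =>
    if c = '-' then ([], (pvSplit r).1 :: (pvSplit r).2)
    else (c :: (pvSplit r).1, (pvSplit r).2)

lemma splitOn_go_eq :
    ∀ (fuel : Nat) (l cur : List Char) (acc : List (List Char)), l.length < fuel →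
      PySem.Chars.splitOn.go ['-'] fuel l cur acc =
        acc.reverse ++ (cur.reverse ++ (pvSplit l).1) :: (pvSplit l).2 := by
  intro fuel
  induction fuel with
  | zero => intro l cur acc h; omega
  | succ f ih =>
    intro l cur acc h
    cases l with
    | nil => simp [PySem.Chars.splitOn.go, pvSplit]
    | cons c rest =>
      rw [PySem.Chars.splitOn.go]
      by_cases hc : c = '-'
      · rw [if_pos (by simp [List.isPrefixOf, hc])]
        rw [ih _ _ _ (by simp at h ⊢; omega)]
        simp [pvSplit, hc]
      · rw [if_neg (by simp [List.isPrefixOf]; exact fun hh => hc hh.symm)]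
        rw [ih _ _ _ (by simp at h ⊢; omega)]
        simp [pvSplit, hc]

lemma splitOn_eq (cs : List Char) :
    PySem.Chars.splitOn cs ['-'] = (pvSplit cs).1 :: (pvSplit cs).2 := by
  unfold PySem.Chars.splitOn
  rw [splitOn_go_eq _ _ _ _ (by omega)]
  simp

-- ---- the early-return condition, as substring facts ----
lemma head_startswith_iff (cs : List Char) : ['s'] <+: (pvSplit cs).1 ↔ ['s'] <+: cs := by
  cases cs with
  | nil => exact Iff.rfl
  | cons c r =>
    by_cases hc : c = '-' <;>
      simp [pvSplit, hc, List.cons_prefix_cons]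

lemma tail_any_iff :
    ∀ cs : List Char,
      ((pvSplit cs).2.any fun seg => PySem.Chars.startswith seg ['s']) = true ↔
        ['-', 's'] <:+: cs := by
  intro cs
  induction cs with
  | nil => simp [pvSplit]
  | cons c r ih =>
    by_cases hc : c = '-'
    · subst hc
      rw [List.infix_cons_iff]
      simp only [pvSplit]

      constructor
      · intro h
        rcases Bool.or_eq_true_iff.mp h with h | h
        · exact Or.inl (by
            rw [List.cons_prefix_cons]
            exact ⟨rfl, (head_startswith_iff r).mp ((PySem.Chars.startswith_iff _ _).mp h)⟩)
        · exact Or.inr (ih.mp h)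
      · intro h
        rcases h with h | h
        · rw [List.cons_prefix_cons] at h
          exact Bool.or_eq_true_iff.mpr (Or.inl
            ((PySem.Chars.startswith_iff _ _).mpr ((head_startswith_iff r).mpr h.2)))
        · exact Bool.or_eq_true_iff.mpr (Or.inr (ih.mpr h))
    · rw [List.infix_cons_iff]
      simp only [pvSplit, if_neg hc]
      rw [ih]
      constructor
      · exact Or.inr
      · intro h
        rcases h with h | h
        · rw [List.cons_prefix_cons] at h
          exact absurd h.1.symm hc
        · exact h

lemma cond_eq (code : String) :
    ((pySplitDash code).any fun seg => PySem.Str.startswith seg "s") =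
      (PySem.Str.startswith code "s" || PySem.Str.isIn "-s" code) := by
  unfold pySplitDash
  rw [show ("-".toList) = ['-'] from rfl, splitOn_eq]
  simp only [List.map_cons, List.any_cons, List.any_map]
  have hb : ∀ x : List Char, PySem.Str.startswith (String.ofList x) "s" =
      PySem.Chars.startswith x ['s'] := by
    intro x; rw [PySem.Str.startswith_eq]; simp
  rw [hb]
  have hcomp : ((pvSplit code.toList).2.any ((fun seg => PySem.Str.startswith seg "s") ∘ String.ofList))
      = ((pvSplit code.toList).2.any fun seg => PySem.Chars.startswith seg ['s']) := by
    congr 1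
    funext x
    simp only [Function.comp_apply, hb]
  rw [hcomp, Bool.eq_iff_iff]
  simp only [Bool.or_eq_true]
  apply or_congr
  · rw [PySem.Chars.startswith_iff, PySem.Str.startswith_eq, PySem.Chars.startswith_iff,
      show ("s".toList) = ['s'] from rfl]
    exact head_startswith_iff code.toList
  · rw [tail_any_iff, PySem.Str.isIn_iff_infix, show ("-s".toList) = ['-', 's'] from rfl]

-- ---- the trailing dash-free run of the string, and the marked string both programs build ----
def pvP : Char → Bool := fun c => c != '-'

def pvTW (cs : List Char) : List Char := cs.reverse.takeWhile pvP

def pvMark (cs : List Char) : List Char :=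
  cs.take (cs.length - (pvTW cs).length) ++ 's' :: (pvTW cs).reverse

lemma tw_le (cs : List Char) : (pvTW cs).length ≤ cs.length := by
  unfold pvTW
  calc (cs.reverse.takeWhile pvP).length ≤ cs.reverse.length :=
      (List.takeWhile_prefix pvP).length_le
    _ = cs.length := List.length_reverse

lemma tw_no_dash (cs : List Char) (h : '-' ∉ cs) : pvTW cs = cs.reverse := by
  unfold pvTW
  rw [List.takeWhile_eq_self_iff]
  intro x hx
  have : x ∈ cs := List.mem_reverse.mp hx
  simp only [pvP, bne_iff_ne, ne_eq]
  exact fun hh => h (hh ▸ this)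

lemma tw_cons_mem (c : Char) (r : List Char) (h : '-' ∈ r) : pvTW (c :: r) = pvTW r := by
  unfold pvTW
  rw [List.reverse_cons, List.takeWhile_append]
  rw [if_neg]
  intro hlen
  have heq : r.reverse.takeWhile pvP = r.reverse :=
    (List.takeWhile_prefix pvP).eq_of_length (by rw [hlen])
  have : pvP '-' = true := by
    have := (List.takeWhile_eq_self_iff.mp heq) '-' (List.mem_reverse.mpr h)
    exact this
  simp [pvP] at this

lemma tw_cons_dash (r : List Char) : pvTW ('-' :: r) = pvTW r := by
  by_cases h : '-' ∈ r
  · exact tw_cons_mem _ _ h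
  · unfold pvTW
    rw [List.reverse_cons, List.takeWhile_append]
    have htw : List.takeWhile pvP r.reverse = r.reverse := tw_no_dash r h
    rw [if_pos (by rw [htw])]
    have h1 : List.takeWhile pvP ['-'] = [] := by simp [pvP]
    rw [h1, List.append_nil, htw]

lemma pvMark_cons (c : Char) (r : List Char) (h : pvTW (c :: r) = pvTW r) :
    pvMark (c :: r) = c :: pvMark r := by
  unfold pvMark
  rw [h]
  have hle := tw_le r
  have : (c :: r).length - (pvTW r).length = (r.length - (pvTW r).length) + 1 := by
    simp only [List.length_cons]; omega
  rw [this, List.take_succ_cons, List.cons_append]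

lemma pvSplit_no_dash : ∀ r : List Char, '-' ∉ r → pvSplit r = (r, []) := by
  intro r
  induction r with
  | nil => intro _; rfl
  | cons c t ih =>
    intro h
    have hc : ¬ c = '-' := fun hh => h (by simp [hh])
    have ht : '-' ∉ t := fun hh => h (by simp [hh])
    simp [pvSplit, hc, ih ht]

lemma pvSplit_tail_ne : ∀ r : List Char, '-' ∈ r → (pvSplit r).2 ≠ [] := by
  intro r
  induction r with
  | nil => intro h; simp at h
  | cons c t ih =>
    intro h
    by_cases hc : c = '-'
    · simp [pvSplit, hc]
    · have ht : '-' ∈ t := by rcases List.mem_cons.mp h with h | h; exact absurd h.symm hc; exact h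
      simp [pvSplit, hc]
      exact ih ht

lemma join_cons_ne (a : List Char) (xs : List (List Char)) (h : xs ≠ []) :
    PySem.Chars.join ['-'] (a :: xs) = a ++ '-' :: PySem.Chars.join ['-'] xs := by
  cases xs with
  | nil => exact absurd rfl h
  | cons b bs =>
    rw [PySem.Chars.join_cons_cons]
    simp

lemma fin_eq : ∀ cs : List Char,
    PySem.Chars.join ['-']
        (((pvSplit cs).1 :: (pvSplit cs).2).dropLast ++
          ['s' :: ((pvSplit cs).1 :: (pvSplit cs).2).getLastD []]) = pvMark cs := by
  intro cs
  induction cs with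
  | nil =>
    simp [pvSplit, pvMark, pvTW, PySem.Chars.join_singleton]
  | cons c r ih =>
    by_cases hc : c = '-'
    · subst hc
      have hps : pvSplit ('-' :: r) = ([], (pvSplit r).1 :: (pvSplit r).2) := by
        simp [pvSplit]
      rw [hps]
      have htail : ((pvSplit r).1 :: (pvSplit r).2).dropLast ++
          ['s' :: ((pvSplit r).1 :: (pvSplit r).2).getLastD []] ≠ [] := by simp
      have hshape : (([] : List Char) :: (pvSplit r).1 :: (pvSplit r).2).dropLast =
          [] :: ((pvSplit r).1 :: (pvSplit r).2).dropLast := rfl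
      have hlast : (([] : List Char) :: (pvSplit r).1 :: (pvSplit r).2).getLastD [] =
          ((pvSplit r).1 :: (pvSplit r).2).getLastD [] := by
        simp [List.getLastD_eq_getLast?, List.getLast?_cons_cons]
      rw [hshape, hlast, List.cons_append, join_cons_ne _ _ (by simp), ih]
      rw [pvMark_cons _ _ (tw_cons_dash r)]
      simp
    · by_cases hr : '-' ∈ r
      · have ht := pvSplit_tail_ne r hr
        simp only [pvSplit, if_neg hc]
        cases htt : (pvSplit r).2 with
        | nil => exact absurd htt ht
        | cons q qs =>
          have hlast1 : ((c :: (pvSplit r).1) :: q :: qs).getLastD [] = (q :: qs).getLastD [] := by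
            simp [List.getLastD_eq_getLast?, List.getLast?_cons_cons]
          have hlast2 : ((pvSplit r).1 :: q :: qs).getLastD [] = (q :: qs).getLastD [] := by
            simp [List.getLastD_eq_getLast?, List.getLast?_cons_cons]
          have hdrop1 : ((c :: (pvSplit r).1) :: q :: qs).dropLast =
              (c :: (pvSplit r).1) :: (q :: qs).dropLast := rfl
          have hdrop2 : ((pvSplit r).1 :: q :: qs).dropLast =
              (pvSplit r).1 :: (q :: qs).dropLast := rfl
          rw [htt] at ih
          rw [hdrop2, hlast2, List.cons_append, join_cons_ne _ _ (by simp)] at ih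
          rw [hdrop1, hlast1, List.cons_append, join_cons_ne _ _ (by simp)]
          rw [pvMark_cons _ _ (tw_cons_mem c r hr), ← ih]
          simp
      · have hsp := pvSplit_no_dash r hr
        have hnone : '-' ∉ c :: r := by
          intro h; rcases List.mem_cons.mp h with h | h
          exact hc h.symm; exact hr h
        have hps : pvSplit (c :: r) = (c :: r, []) := by
          simp [pvSplit, hc, hsp]
        rw [hps]
        rw [show ((c :: r, ([] : List (List Char))).1 :: (c :: r, ([] : List (List Char))).2) = [c :: r] from rfl]
        have hd : ([c :: r] : List (List Char)).dropLast = [] := rfl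
        have hg : ([c :: r] : List (List Char)).getLastD [] = c :: r := rfl
        rw [hd, hg, List.nil_append]
        rw [PySem.Chars.join_singleton]
        unfold pvMark
        rw [tw_no_dash _ hnone]
        simp

-- ---- rfind on the single-char pattern '-' ----
lemma rfind_go_eq (cs : List Char) :
    ∀ j, j < cs.length →
      PySem.Chars.rfind.go cs ['-'] j =
        (j : Int) - ((cs.take (j + 1)).reverse.takeWhile pvP).length := by
  intro j
  induction j with
  | zero =>
    intro h
    cases cs with
    | nil => simp at h
    | cons c r =>
      rw [PySem.Chars.rfind.go]
      by_cases hc : c = '-'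
      · rw [if_pos (by simp [List.isPrefixOf, hc])]
        simp [pvP, hc]
      · rw [if_neg (by simp [List.isPrefixOf]; exact fun hh => hc hh.symm)]
        simp [pvP, hc]
  | succ j ih =>
    intro h
    have hgetlt : j + 1 < cs.length := h
    have hdrop : cs.drop (j + 1) = cs[j + 1] :: cs.drop (j + 2) := List.drop_eq_getElem_cons h
    have htake : (cs.take (j + 2)).reverse = cs[j + 1] :: (cs.take (j + 1)).reverse := by
      rw [show j + 2 = (j + 1) + 1 from rfl, List.take_add_one]
      rw [List.getElem?_eq_getElem h]
      simp
    rw [PySem.Chars.rfind.go]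
    by_cases hc : cs[j + 1] = '-'
    · rw [if_pos (by rw [hdrop]; simp [List.isPrefixOf, hc])]
      rw [htake, List.takeWhile_cons_of_neg (by simp [pvP, hc])]
      simp
    · rw [if_neg (by rw [hdrop]; simp [List.isPrefixOf]; exact fun hh => hc hh.symm)]
      rw [ih (by omega), htake, List.takeWhile_cons_of_pos (by simp [pvP, hc])]
      simp only [List.length_cons]
      push_cast
      ring
lemma rfind_dash (cs : List Char) :
    PySem.Chars.rfind cs ['-'] = (cs.length : Int) - 1 - (pvTW cs).length := by
  unfold PySem.Chars.rfind
  cases cs with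
  | nil => simp [PySem.Chars.rfind.go, List.isPrefixOf, pvTW]
  | cons c r =>
    rw [show (c :: r).length = r.length + 1 from rfl, PySem.Chars.rfind.go]
    rw [if_neg (by rw [List.drop_of_length_le (by simp)]; simp [List.isPrefixOf])]
    rw [rfind_go_eq _ _ (by simp)]
    rw [List.take_of_length_le (by simp)]
    unfold pvTW
    push_cast
    ring

lemma drop_tw (cs : List Char) :
    cs.drop (cs.length - (pvTW cs).length) = (pvTW cs).reverse := by
  obtain ⟨a, ha⟩ : ∃ a, a = (cs.reverse.dropWhile pvP).reverse := ⟨_, rfl⟩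
  obtain ⟨b, hbd⟩ : ∃ b, b = (pvTW cs).reverse := ⟨_, rfl⟩
  have hsplit : (pvTW cs) ++ cs.reverse.dropWhile pvP = cs.reverse :=
    List.takeWhile_append_dropWhile
  have hrev : a ++ b = cs := by
    rw [ha, hbd, ← List.reverse_append, hsplit, List.reverse_reverse]
  have hlb : (pvTW cs).length = b.length := by rw [hbd, List.length_reverse]
  rw [hlb, ← hbd, ← hrev, List.length_append, Nat.add_sub_cancel, List.drop_left]

-- ===== VERDICT (by name: the statement is the Claim_ definition above) =====
theorem getReplyCode_spec : Claim_equal_getReplyCode := by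
  intro code _
  unfold Spec_getReplyCode getReplyCode getReplyCode_alt
  have hne : pySplitDash code ≠ [] := by
    unfold pySplitDash
    rw [show ("-".toList) = ['-'] from rfl, splitOn_eq]
    simp
  rw [goA_eq code (pySplitDash code).length (pySplitDash code) 0 "" hne (by simp), cond_eq]
  rcases Bool.eq_false_or_eq_true (PySem.Str.startswith code "s" || PySem.Str.isIn "-s" code) with hb | hb
  · rw [hb]
    simp
  · rw [hb]
    simp only [Bool.false_eq_true, if_false]
    set cs := code.toList with hcs
    have hi : PySem.Str.rfind code "-" = (cs.length : Int) - 1 - (pvTW cs).length := by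
      rw [PySem.Str.rfind_eq, show ("-".toList) = ['-'] from rfl, rfind_dash]
    have hle := tw_le cs
    have hnn : (0 : Int) ≤ PySem.Str.rfind code "-" + 1 := by rw [hi]; omega
    have htn : (PySem.Str.rfind code "-" + 1).toNat = cs.length - (pvTW cs).length := by
      rw [hi]; omega
    rw [← String.toList_inj]
    simp only [String.toList_append, PySem.Str.toList_join, PySem.Str.toList_slice,
      PySem.Chars.slice_eq_listSlice]
    rw [PySem.List.slice_to _ hnn, PySem.List.slice_from _ hnn, htn]
    -- left side: reduce the String-level segment list to the char-level one
    unfold pySplitDash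
    rw [show ("-".toList) = ['-'] from rfl, splitOn_eq]
    have hmap : ∀ (L : List (List Char)), L ≠ [] →
        List.map String.toList
            ((L.map String.ofList).dropLast ++ ["s" ++ (L.map String.ofList).getLastD ""]) =
          L.dropLast ++ ['s' :: L.getLastD []] := by
      intro L hL
      have h2 : (L.map String.ofList).getLastD "" = String.ofList (L.getLastD []) := by
        cases L with
        | nil => exact absurd rfl hL
        | cons a as =>
          simp only [List.getLastD_eq_getLast?, List.getLast?_map]
          cases h : (a :: as).getLast? with
          | none => simp at h
          | some x => simp
      rw [h2, List.map_append]
      congr 1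
      · have hco : (String.toList ∘ String.ofList) = id := by
          funext x; exact String.toList_ofList
        rw [← List.map_dropLast, List.map_map, hco, List.map_id]
      · simp [String.toList_append, String.toList_ofList]
    rw [hmap _ (by simp)]
    rw [fin_eq]
    unfold pvMark
    rw [drop_tw]
    have hlen : code.toList.length = cs.length := rfl
    rw [hlen]
    simp
    rw [← hcs]
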